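-- pv_equiv track=rewrite | github.com/ezzzzzz123456/contractSenseRed | ai-service/app/services/clause_detector.py | _hierarchy_from_marker
-- ===== SOURCE A (Python) =====
-- def _hierarchy_from_marker(marker: str, current_section: str) -> list[str]:
--     hierarchy = [current_section]
--     if "." in marker:
--         prefixes = marker.split(".")
--         running: list[str] = []
--         for prefix in prefixes:
--             running.append(prefix)
--             hierarchy.append(".".join(running))
--     else:
--         hierarchy.append(marker)
--     return hierarchy
-- ===== SOURCE B (Python) =====
-- def _hierarchy_from_marker(marker: str, current_section: str) -> list[str]:
--     hierarchy = [current_section]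
--     if "." in marker:
--         for i, ch in enumerate(marker):
--             if ch == ".":
--                 hierarchy.append(marker[:i])
--         hierarchy.append(marker)
--     else:
--         hierarchy.append(marker)
--     return hierarchy
-- ===== Notes on version B (the rewrite author's own statement) =====
-- stated objective: alternative
-- what changed: Instead of splitting the marker on '.' and re-joining a growing list of segments at every step, B scans the characters once and slices the original string at each dot position, appending the full marker at the end.
import Mathlib
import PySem

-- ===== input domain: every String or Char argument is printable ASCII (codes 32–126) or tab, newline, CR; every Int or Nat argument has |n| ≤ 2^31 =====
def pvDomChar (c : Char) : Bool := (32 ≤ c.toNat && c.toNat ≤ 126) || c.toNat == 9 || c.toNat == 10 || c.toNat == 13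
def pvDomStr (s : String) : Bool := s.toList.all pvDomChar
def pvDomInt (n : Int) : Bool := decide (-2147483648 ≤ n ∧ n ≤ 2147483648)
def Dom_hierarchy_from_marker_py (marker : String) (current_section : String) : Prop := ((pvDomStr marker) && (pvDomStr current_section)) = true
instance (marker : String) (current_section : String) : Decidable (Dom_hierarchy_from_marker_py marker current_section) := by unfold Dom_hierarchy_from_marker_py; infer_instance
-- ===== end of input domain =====

-- B replaces A's split-then-rejoin accumulation by a single character scan that slices
-- the original marker at each dot position (alternative decomposition, same results).

-- ===== PORT A =====
-- literal port of A: hierarchy = [current_section]; if "." in marker, fold over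
-- marker.split(".") keeping the running segment list and appending ".".join(running)
def hierarchy_from_marker_py (marker : String) (current_section : String) : List String :=
  let hierarchy : List String := [current_section]
  if PySem.Str.isIn "." marker then
    let prefixes : List String := (PySem.Str.split? marker ".").getD []  -- sep "." ≠ "": never none
    (prefixes.foldl
      (fun (st : List String × List String) p =>
        (st.1 ++ [p], st.2 ++ [PySem.Str.join "." (st.1 ++ [p])]))
      (([] : List String), hierarchy)).2
  else
    hierarchy ++ [marker]

-- ===== PORT B =====
-- literal port of B: for i, ch in enumerate(marker): if ch == '.': append marker[:i];
-- then append marker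
def hierarchy_from_marker_py_alt (marker : String) (current_section : String) : List String :=
  let hierarchy : List String := [current_section]
  if PySem.Str.isIn "." marker then
    ((PySem.List.enumerate marker.toList 0).foldl
      (fun acc (p : Int × Char) =>
        if p.2 = '.' then acc ++ [PySem.Str.slice marker none (some p.1)] else acc)
      hierarchy) ++ [marker]
  else
    hierarchy ++ [marker]

-- ===== PRECONDITION & SPEC =====
def Spec_hierarchy_from_marker_py (marker : String) (current_section : String) (out : List String) : Prop := out = hierarchy_from_marker_py_alt marker current_section
instance (marker : String) (current_section : String) (out : List String) : Decidable (Spec_hierarchy_from_marker_py marker current_section out) := by unfold Spec_hierarchy_from_marker_py; infer_instance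

-- ===== CLAIM (what is proved, stated in full; the proofs are below) =====
def Claim_equal_hierarchy_from_marker_py : Prop := ∀ (marker : String) (current_section : String), Dom_hierarchy_from_marker_py marker current_section → Spec_hierarchy_from_marker_py marker current_section (hierarchy_from_marker_py marker current_section)

-- ===== LEMMAS AND PROOFS =====

-- spec of Chars.splitOn cs ['.'] as a structural recursion
def pvSegs : List Char → List (List Char)
  | [] => [[]]
  | c :: rest => if c = '.' then [] :: pvSegs rest else (pvSegs rest).modifyHead (c :: ·)

lemma pvSegs_ne_nil (cs : List Char) : pvSegs cs ≠ [] := by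
  cases cs with
  | nil => simp [pvSegs]
  | cons c rest =>
    simp only [pvSegs]
    split_ifs
    · simp
    · cases h : pvSegs rest with
      | nil => exact absurd h (pvSegs_ne_nil rest)
      | cons a l => simp

lemma splitOn_go_spec (fuel : Nat) (l cur : List Char) (acc : List (List Char))
    (hf : l.length < fuel) :
    PySem.Chars.splitOn.go ['.'] fuel l cur acc
      = acc.reverse ++ (pvSegs l).modifyHead (cur.reverse ++ ·) := by
  induction fuel generalizing l cur acc with
  | zero => omega
  | succ fuel ih =>
    cases l with
    | nil =>
      rw [PySem.Chars.splitOn.go]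
      · simp [pvSegs]
      · omega
    | cons c rest =>
      rw [PySem.Chars.splitOn.go]
      by_cases hc : c = '.'
      · subst hc
        simp only [List.isPrefixOf, List.length_cons, List.length_nil, BEq.rfl,
          Bool.true_and, if_true, List.drop_succ_cons,
          List.drop_zero]
        rw [ih _ _ _ (by simpa using Nat.lt_of_succ_lt_succ hf)]
        cases hS : pvSegs rest with
        | nil => exact absurd hS (pvSegs_ne_nil rest)
        | cons a L => simp [pvSegs, hS]
      · have hpre : ['.'].isPrefixOf (c :: rest) = false := by
          simp [List.isPrefixOf]
          exact fun h => hc h.symm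
        rw [hpre]
        simp only [Bool.false_eq_true, if_false]
        rw [ih _ _ _ (by simpa using Nat.lt_of_succ_lt_succ hf)]
        cases hS : pvSegs rest with
        | nil => exact absurd hS (pvSegs_ne_nil rest)
        | cons a L => simp [pvSegs, hc, hS]

lemma splitOn_eq_pvSegs (cs : List Char) :
    PySem.Chars.splitOn cs ['.'] = pvSegs cs := by
  rw [PySem.Chars.splitOn, splitOn_go_spec _ _ _ _ (by omega)]
  cases hS : pvSegs cs with
  | nil => exact absurd hS (pvSegs_ne_nil cs)
  | cons a L => simp

-- A's per-step joins: pvPJ running segs = the list of ".".join(running ++ first k segs)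
def pvPJ (r : List (List Char)) : List (List Char) → List (List Char)
  | [] => []
  | s :: rest => PySem.Chars.join ['.'] (r ++ [s]) :: pvPJ (r ++ [s]) rest

-- B's slices: the prefixes of cs cut at each dot position
def pvBP : List Char → List (List Char)
  | [] => []
  | c :: rest => (if c = '.' then [[]] else []) ++ (pvBP rest).map (c :: ·)

lemma join_cons_head (c : Char) (h : List Char) (l : List (List Char)) :
    PySem.Chars.join ['.'] ((c :: h) :: l) = c :: PySem.Chars.join ['.'] (h :: l) := by
  cases l with
  | nil => simp [PySem.Chars.join_singleton]
  | cons a l' => simp [PySem.Chars.join_cons_cons]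

lemma pvPJ_cons_head (tail : List (List Char)) :
    ∀ (r : List (List Char)) (h : List Char) (c : Char),
      pvPJ ((c :: h) :: r) tail = (pvPJ (h :: r) tail).map (c :: ·) := by
  induction tail with
  | nil => intro r h c; simp [pvPJ]
  | cons s tail ih =>
    intro r h c
    simp only [pvPJ, List.cons_append, List.map_cons, join_cons_head, List.cons.injEq]
    exact ⟨trivial, ih (r ++ [s]) h c⟩

lemma pvPJ_nil_head (tail : List (List Char)) :
    ∀ (r : List (List Char)), r ≠ [] →
      pvPJ ([] :: r) tail = (pvPJ r tail).map ('.' :: ·) := by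
  induction tail with
  | nil => intro r _; simp [pvPJ]
  | cons s tail ih =>
    intro r hr
    obtain ⟨a, r', rfl⟩ := List.exists_cons_of_ne_nil hr
    simp only [pvPJ, List.cons_append, List.map_cons, List.cons.injEq]
    refine ⟨?_, ih (a :: (r' ++ [s])) (by simp)⟩
    rw [PySem.Chars.join_cons_cons]
    simp

lemma pvPJ_eq_pvBP (cs : List Char) :
    pvPJ [] (pvSegs cs) = pvBP cs ++ [cs] := by
  induction cs with
  | nil => simp [pvSegs, pvPJ, pvBP, PySem.Chars.join_singleton]
  | cons c rest ih =>
    cases hS : pvSegs rest with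
    | nil => exact absurd hS (pvSegs_ne_nil rest)
    | cons s r =>
      rw [hS] at ih
      have htail : pvBP rest ++ [rest] = s :: pvPJ [s] r := by
        rw [← ih]; simp [pvPJ, PySem.Chars.join_singleton]
      by_cases hc : c = '.'
      · subst hc
        have h1 : pvSegs ('.' :: rest) = [] :: s :: r := by simp [pvSegs, hS]
        have h2 : pvBP ('.' :: rest) = [] :: (pvBP rest).map ('.' :: ·) := by
          simp [pvBP]
        rw [h1, h2]
        simp only [pvPJ, List.nil_append, List.cons_append,
          PySem.Chars.join_singleton, PySem.Chars.join_cons_cons]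
        rw [pvPJ_nil_head r [s] (by simp)]
        have h3 : (pvBP rest).map ('.' :: ·) ++ ['.' :: rest]
            = ('.' :: s) :: (pvPJ [s] r).map ('.' :: ·) := by
          have := congrArg (List.map ('.' :: ·)) htail
          simpa using this
        simp [h3]
      · have h1 : pvSegs (c :: rest) = (c :: s) :: r := by simp [pvSegs, hc, hS]
        have h2 : pvBP (c :: rest) = (pvBP rest).map (c :: ·) := by
          simp [pvBP, hc]
        rw [h1, h2]
        simp only [pvPJ, List.nil_append, PySem.Chars.join_singleton]
        rw [pvPJ_cons_head r [] s c]
        have h3 : (pvBP rest).map (c :: ·) ++ [c :: rest]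
            = (c :: s) :: (pvPJ [s] r).map (c :: ·) := by
          have := congrArg (List.map (c :: ·)) htail
          simpa using this
        simp [h3]

lemma afold (ps : List String) :
    ∀ (r out : List String),
      ((ps.foldl
        (fun (st : List String × List String) p =>
          (st.1 ++ [p], st.2 ++ [PySem.Str.join "." (st.1 ++ [p])]))
        (r, out)).2).map String.toList
      = out.map String.toList ++ pvPJ (r.map String.toList) (ps.map String.toList) := by
  induction ps with
  | nil => intro r out; simp [pvPJ]
  | cons p ps ih =>
    intro r out
    simp only [List.foldl_cons, List.map_cons, pvPJ]
    rw [ih]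
    simp only [List.map_append, List.map_cons, List.map_nil, List.append_assoc]
    congr 2
    rw [PySem.Str.toList_join]
    simp

lemma bfold (marker : String) :
    ∀ (cs pre : List Char) (acc : List String), marker.toList = pre ++ cs →
      (((PySem.List.enumerate cs (pre.length : Int)).foldl
        (fun acc (p : Int × Char) =>
          if p.2 = '.' then acc ++ [PySem.Str.slice marker none (some p.1)] else acc)
        acc)).map String.toList
      = acc.map String.toList ++ (pvBP cs).map (pre ++ ·) := by
  intro cs
  induction cs with
  | nil => intro pre acc _; simp [pvBP]
  | cons c rest ih =>
    intro pre acc h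
    rw [PySem.List.enumerate_cons]
    simp only [List.foldl_cons]
    have hcast : ((pre.length : Int) + 1) = (((pre ++ [c]).length : Nat) : Int) := by
      simp
    have h' : marker.toList = (pre ++ [c]) ++ rest := by
      rw [h]; simp
    by_cases hc : c = '.'
    · subst hc
      have hsl : (PySem.Str.slice marker none (some (pre.length : Int))).toList = pre := by
        rw [PySem.Str.toList_slice, PySem.Chars.slice_eq_listSlice,
          PySem.List.slice_to_natCast, h]
        exact List.take_left
      rw [hcast, ih (pre ++ ['.']) _ h']
      simp [pvBP, hsl, Function.comp, List.append_assoc]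
    · simp only [if_neg (by simpa using hc)]
      rw [hcast, ih (pre ++ [c]) _ h']
      simp [pvBP, hc, Function.comp, List.append_assoc]

-- ===== VERDICT (by name: the statement is the Claim_ definition above) =====
theorem hierarchy_from_marker_py_spec : Claim_equal_hierarchy_from_marker_py := by
  intro marker cur _
  unfold Spec_hierarchy_from_marker_py hierarchy_from_marker_py hierarchy_from_marker_py_alt
  by_cases h : PySem.Str.isIn "." marker = true
  · simp only [h, if_true]  -- '.' in marker
    obtain ⟨ps, hps, hmap⟩ : ∃ ps, PySem.Str.split? marker "." = some ps ∧
        ps.map String.toList = PySem.Chars.splitOn marker.toList ['.'] := by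
      have hb := PySem.Str.split?_map marker "."
      have hs : PySem.Chars.split? marker.toList ".".toList
          = some (PySem.Chars.splitOn marker.toList ['.']) := by
        simp [PySem.Chars.split?]
      rw [hs] at hb
      cases hx : PySem.Str.split? marker "." with
      | none => rw [hx] at hb; simp at hb
      | some ps => rw [hx] at hb; simp at hb; exact ⟨ps, rfl, hb⟩
    apply List.map_injective_iff.mpr (fun a b hab => String.toList_inj.mp hab)
    rw [hps]
    simp only [Option.getD_some]
    rw [afold ps [] [cur]]
    have hb := bfold marker marker.toList [] [cur] (by simp)
    simp only [List.length_nil, Nat.cast_zero, List.nil_append] at hb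
    simp only [List.map_append, hb]
    rw [hmap, splitOn_eq_pvSegs]
    simp [pvPJ_eq_pvBP]
  · simp only [h, Bool.false_eq_true, if_false]
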